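-- pv_equiv track=rewrite | github.com/Zaharazov/NumMethods | Lab3/3.3.py | normal_system2
-- ===== SOURCE A (Python) =====
-- def normal_system2(x, y):
--     n = len(x)
--     sum_x = sum(x)
--     sum_x2 = sum(xi**2 for xi in x)
--     sum_x3 = sum(xi**3 for xi in x)
--     sum_x4 = sum(xi**4 for xi in x)
--     sum_y = sum(y)
--     sum_xy = sum(x[i]*y[i] for i in range(n))
--     sum_x2y = sum((x[i]**2)*y[i] for i in range(n))
--
--     A = [
--         [n,        sum_x,   sum_x2],
--         [sum_x,    sum_x2,  sum_x3],
--         [sum_x2,   sum_x3,  sum_x4]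
--     ]
--     b = [sum_y, sum_xy, sum_x2y]
--     return A, b
-- ===== SOURCE B (Python) =====
-- def normal_system2(x, y):
--     # Normal-equation matrix assembled incrementally as a sum of rank-1 outer
--     # products v v^T, v = (1, xi, xi^2); no global power sums are ever formed.
--     # b's zeroth moment needs no pairing, so it is just sum(y); the two cross
--     # moments accumulate alongside the matrix.
--     A = [[0, 0, 0] for _ in range(3)]
--     b = [sum(y), 0, 0]
--     for xi, yi in zip(x, y):
--         v = (1, xi, xi * xi)
--         for i in range(3):
--             for j in range(3):
--                 A[i][j] += v[i] * v[j]
--         b[1] += xi * yi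
--         b[2] += xi * xi * yi
--     return A, b
-- ===== Notes on version B (the rewrite author's own statement) =====
-- stated objective: alternative
-- what changed: Replaces A's eight global reductions (power sums written into a literal Hankel matrix) with an incremental rank-1 assembly: for each sample the outer product of the basis vector v=(1,x,x^2) is added into the 3x3 matrix via two nested index loops, so neither the power sums nor the literal matrix ever appear; only b's cross moments ride along and b[0] stays sum(y).
import Mathlib
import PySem

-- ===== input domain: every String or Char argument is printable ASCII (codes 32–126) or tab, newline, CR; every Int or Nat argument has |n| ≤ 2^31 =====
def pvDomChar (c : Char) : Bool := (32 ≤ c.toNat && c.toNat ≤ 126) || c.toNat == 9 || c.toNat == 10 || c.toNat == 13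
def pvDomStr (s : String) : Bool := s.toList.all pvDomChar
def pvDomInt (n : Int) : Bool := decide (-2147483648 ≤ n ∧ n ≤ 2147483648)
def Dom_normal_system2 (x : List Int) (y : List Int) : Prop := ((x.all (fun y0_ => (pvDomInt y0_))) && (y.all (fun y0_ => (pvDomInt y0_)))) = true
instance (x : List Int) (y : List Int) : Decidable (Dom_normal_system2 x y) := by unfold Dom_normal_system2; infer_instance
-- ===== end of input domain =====

-- B assembles the normal system incrementally as a sum of rank-1 outer products
-- v v^T (v = (1, x, x^2)) instead of A's eight global power-sum reductions;
-- same cost, alternative algorithm.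


-- ===== PORT A =====
def normal_system2 (x : List Int) (y : List Int) : List (List Int) × List Int :=
  let n : Int := x.length
  let sum_x := x.foldl (· + ·) 0
  let sum_x2 := x.foldl (fun acc xi => acc + xi ^ 2) 0
  let sum_x3 := x.foldl (fun acc xi => acc + xi ^ 3) 0
  let sum_x4 := x.foldl (fun acc xi => acc + xi ^ 4) 0
  let sum_y := y.foldl (· + ·) 0
  let sum_xy := (PySem.List.pyRange 0 n 1).foldl
    (fun acc i => acc + PySem.List.pyGetD x i 0 * PySem.List.pyGetD y i 0) 0
  let sum_x2y := (PySem.List.pyRange 0 n 1).foldl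
    (fun acc i => acc + (PySem.List.pyGetD x i 0) ^ 2 * PySem.List.pyGetD y i 0) 0
  let A : List (List Int) :=
    [[n, sum_x, sum_x2],
     [sum_x, sum_x2, sum_x3],
     [sum_x2, sum_x3, sum_x4]]
  let b : List Int := [sum_y, sum_xy, sum_x2y]
  (A, b)

-- ===== PORT B =====
-- Each zip step rebuilds A and b entrywise from the old state plus the rank-1
-- update, mirroring Source B's nested `for i`/`for j` += loops.
def pvRank1Step (st : List (List Int) × Int × Int) (p : Int × Int) : List (List Int) × Int × Int :=
  let v : List Int := [1, p.1, p.1 * p.1]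
  ((List.range 3).map (fun i => (List.range 3).map (fun j =>
      (st.1.getD i []).getD j 0 + v.getD i 0 * v.getD j 0)),
   st.2.1 + p.1 * p.2, st.2.2 + p.1 * p.1 * p.2)

def normal_system2_alt (x : List Int) (y : List Int) : List (List Int) × List Int :=
  let b0 := y.foldl (· + ·) 0
  let r := (x.zip y).foldl pvRank1Step ([[0, 0, 0], [0, 0, 0], [0, 0, 0]], 0, 0)
  (r.1, [b0, r.2.1, r.2.2])

-- ===== PRECONDITION & SPEC =====
-- Pre_ excludes exactly the inputs with len(y) < len(x), on which A raises IndexError.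
def Pre_normal_system2 (x : List Int) (y : List Int) : Prop := x.length ≤ y.length
instance (x : List Int) (y : List Int) : Decidable (Pre_normal_system2 x y) := by unfold Pre_normal_system2; infer_instance
def pvWitness_normal_system2 : List Int × List Int := ([1, 2, 3], [2, 4, 7])
def Spec_normal_system2 (x : List Int) (y : List Int) (out : List (List Int) × List Int) : Prop := out = normal_system2_alt x y
instance (x : List Int) (y : List Int) (out : List (List Int) × List Int) : Decidable (Spec_normal_system2 x y out) := by unfold Spec_normal_system2; infer_instance

-- ===== CLAIM (what is proved, stated in full; the proofs are below) =====
def Claim_equal_normal_system2 : Prop := ∀ (x : List Int) (y : List Int), Dom_normal_system2 x y → Pre_normal_system2 x y → Spec_normal_system2 x y (normal_system2 x y)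

-- ===== LEMMAS AND PROOFS =====

-- A's index loop over range(len(x)), in Nat-index form, equals the same sum over zip(x, y).
theorem pv_cross_nat (f : Int → Int → Int) :
    ∀ (x y : List Int), x.length ≤ y.length → ∀ (acc : Int),
      (List.range x.length).foldl (fun a k => a + f (x.getD k 0) (y.getD k 0)) acc
      = acc + ((x.zip y).map (fun p => f p.1 p.2)).sum := by
  intro x
  induction x with
  | nil => intro y h acc; simp
  | cons a as ih =>
    intro y h acc
    cases y with
    | nil => simp at h
    | cons b bs =>
      simp only [List.length_cons, List.range_succ_eq_map, List.foldl_cons, List.foldl_map,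
        List.getD_cons_zero, List.getD_cons_succ, List.zip_cons_cons, List.map_cons, List.sum_cons]
      rw [ih bs (by simpa using h)]
      ring

-- A's pyRange/pyGetD loop reduces to the Nat-index form and hence to the zip sum.
theorem pv_cross (f : Int → Int → Int) (x y : List Int) (h : x.length ≤ y.length) (acc : Int) :
    (PySem.List.pyRange 0 (x.length : Int) 1).foldl
      (fun a i => a + f (PySem.List.pyGetD x i 0) (PySem.List.pyGetD y i 0)) acc
    = acc + ((x.zip y).map (fun p => f p.1 p.2)).sum := by
  rw [PySem.List.pyRange_one]
  simp only [zero_add, sub_zero, Int.toNat_natCast, List.foldl_map, PySem.List.pyGetD_natCast]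
  exact pv_cross_nat f x y h acc

-- One rank-1 step on a literal state, written out entrywise.
theorem pvRank1Step_apply (a00 a01 a02 a10 a11 a12 a20 a21 a22 b1 b2 : Int) (p : Int × Int) :
    pvRank1Step ([[a00, a01, a02], [a10, a11, a12], [a20, a21, a22]], b1, b2) p
    = ([[a00 + 1, a01 + p.1, a02 + p.1 * p.1],
        [a10 + p.1, a11 + p.1 * p.1, a12 + p.1 * p.1 * p.1],
        [a20 + p.1 * p.1, a21 + p.1 * p.1 * p.1, a22 + p.1 * p.1 * (p.1 * p.1)]],
       b1 + p.1 * p.2, b2 + p.1 * p.1 * p.2) := by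
  norm_num [pvRank1Step, List.range_succ]
  ring

-- Invariant of B's rank-1 fold: starting from an arbitrary 3x3 / 3-vector state,
-- each entry ends as its start plus the corresponding moment sum over the pairs.
theorem pv_foldB :
    ∀ (l : List (Int × Int)) (a00 a01 a02 a10 a11 a12 a20 a21 a22 b1 b2 : Int),
      l.foldl pvRank1Step
        ([[a00, a01, a02], [a10, a11, a12], [a20, a21, a22]], b1, b2)
      = ([[a00 + (l.map (fun _ => (1 : Int))).sum,
           a01 + (l.map (fun p => p.1)).sum,
           a02 + (l.map (fun p => p.1 * p.1)).sum],
          [a10 + (l.map (fun p => p.1)).sum,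
           a11 + (l.map (fun p => p.1 * p.1)).sum,
           a12 + (l.map (fun p => p.1 * p.1 * p.1)).sum],
          [a20 + (l.map (fun p => p.1 * p.1)).sum,
           a21 + (l.map (fun p => p.1 * p.1 * p.1)).sum,
           a22 + (l.map (fun p => p.1 * p.1 * (p.1 * p.1))).sum]],
         b1 + (l.map (fun p => p.1 * p.2)).sum,
         b2 + (l.map (fun p => p.1 * p.1 * p.2)).sum) := by
  intro l
  induction l with
  | nil => simp
  | cons p t ih =>
    intro a00 a01 a02 a10 a11 a12 a20 a21 a22 b1 b2
    rw [List.foldl_cons, pvRank1Step_apply, ih]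
    simp only [List.map_cons, List.sum_cons, Prod.mk.injEq, List.cons.injEq, and_true]
    and_intros <;> ring

-- Pull a function on the first component out of a zip map (len x ≤ len y).
theorem pv_map_fst (g : Int → Int) (x y : List Int) (h : x.length ≤ y.length) :
    (x.zip y).map (fun p => g p.1) = x.map g := by
  calc (x.zip y).map (fun p => g p.1)
      = ((x.zip y).map Prod.fst).map g := by rw [List.map_map]; rfl
    _ = x.map g := by rw [List.map_fst_zip h]

-- ===== VERDICT =====
theorem normal_system2_spec : Claim_equal_normal_system2 := by
  intro x y _ hpre
  unfold Pre_normal_system2 at hpre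
  unfold Spec_normal_system2 normal_system2 normal_system2_alt
  simp only [pv_foldB, zero_add]
  rw [pv_cross (fun a b => a * b) x y hpre,
      pv_cross (fun a b => a ^ 2 * b) x y hpre]
  rw [pv_map_fst (fun v => v) x y hpre,
      pv_map_fst (fun v => v * v) x y hpre,
      pv_map_fst (fun v => v * v * v) x y hpre,
      pv_map_fst (fun v => v * v * (v * v)) x y hpre,
      PySem.List.foldl_add x (fun v => v) 0,
      PySem.List.foldl_add y (fun v => v) 0,
      PySem.List.foldl_add x (fun v => v ^ 2) 0,
      PySem.List.foldl_add x (fun v => v ^ 3) 0,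
      PySem.List.foldl_add x (fun v => v ^ 4) 0]
  have hones : ((x.zip y).map (fun _ => (1 : Int))).sum = (x.length : Int) := by
    rw [List.map_const']
    simp [List.sum_replicate, List.length_zip, Nat.min_eq_left hpre]
  have hp2 : (fun v : Int => v ^ 2) = fun v => v * v := by funext v; ring
  have hp3 : (fun v : Int => v ^ 3) = fun v => v * v * v := by funext v; ring
  have hp4 : (fun v : Int => v ^ 4) = fun v => v * v * (v * v) := by funext v; ring
  have hq : (fun p : Int × Int => p.1 ^ 2 * p.2) = fun p => p.1 * p.1 * p.2 := by funext p; ring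
  rw [hones, hp2, hp3, hp4, hq]
  simp
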